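-- pv_equiv track=rewrite | github.com/Naoya-U/dnf_enum | dnf_enum.py | generate_irredundant_sops
-- ===== SOURCE A (Python) =====
-- import itertools
--
-- def cube_to_minterms(cube, n):
--     mins = set()
--     for m in range(2 ** n):
--         bits = tuple((m >> i) & 1 for i in reversed(range(n)))
--         ok = True
--         for cb, mb in zip(cube, bits):
--             if cb is None:
--                 continue
--             if cb != mb:
--                 ok = False
--                 break
--         if ok:
--             mins.add(m)
--     return mins
--
-- def is_prime_implicant(cube, minterms, n):
--     """cubeが主項（prime implicant）かどうか判定"""
--     covered = cube_to_minterms(cube, n)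
--     if not covered or not covered <= minterms:
--         return False
--
--     # 変数を1つNoneにしてもまだ valid なら、cubeは極大でない
--     for i in range(n):
--         if cube[i] is not None:
--             generalized = list(cube)
--             generalized[i] = None
--             gen_cov = cube_to_minterms(tuple(generalized), n)
--             if gen_cov <= minterms:
--                 return False
--     return True
--
-- def generate_all_cubes(n):
--     """4変数の全cube（3^4通り）を生成"""
--     vals = [0, 1, None]
--     return list(itertools.product(vals, repeat=n))
--
-- def generate_irredundant_sops(minterms, n):
--     """主項のみを使って、全非冗長積和形を列挙"""
--     all_cubes = generate_all_cubes(n)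
--
--     # 主項（prime implicant）のみ抽出
--     prime_cubes = [c for c in all_cubes if is_prime_implicant(c, minterms, n)]
--
--     # 各主項がカバーするミンターン
--     cube_cover = {c: cube_to_minterms(c, n) for c in prime_cubes}
--
--     irredundant_forms = []
--     for r in range(1, len(prime_cubes) + 1):
--         for combo in itertools.combinations(prime_cubes, r):
--             union_cover = set().union(*(cube_cover[c] for c in combo))
--             if union_cover == minterms:
--                 # 冗長性チェック
--                 redundant = False
--                 for i in range(len(combo)):
--                     smaller = combo[:i] + combo[i+1:]
--                     small_cover = set().union(*(cube_cover[c] for c in smaller))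
--                     if small_cover == minterms:
--                         redundant = True
--                         break
--                 if not redundant:
--                     irredundant_forms.append(combo)
--     return irredundant_forms
-- ===== SOURCE B (Python) =====
-- import itertools
--
-- def generate_irredundant_sops(minterms, n):
--     mset = set(minterms)
--     all_cubes = list(itertools.product([0, 1, None], repeat=n))
--     # one pass: cover list of every cube (ascending minterm order)
--     cover = {}
--     for c in all_cubes:
--         cover[c] = [m for m in range(2 ** n)
--                     if all(cb is None or cb == ((m >> i) & 1)
--                            for cb, i in zip(c, reversed(range(n))))]
--     # prime test by table lookup (no recomputation of covers)
--     prime_cubes = []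
--     for c in all_cubes:
--         s = cover[c]
--         if s and all(m in mset for m in s) and all(
--                 not all(m in mset for m in cover[c[:i] + (None,) + c[i + 1:]])
--                 for i in range(n) if c[i] is not None):
--             prime_cubes.append(c)
--     irredundant_forms = []
--     for r in range(1, len(prime_cubes) + 1):
--         for combo in itertools.combinations(prime_cubes, r):
--             # explicit per-minterm counting pass
--             ms = [m for c in combo for m in cover[c]]
--             counts = {}
--             for m in ms:
--                 counts[m] = counts.get(m, 0) + 1
--             # cover equals minterms, and every cube owns a private minterm
--             if set(ms) == mset and all(
--                     any(counts[m] == 1 for m in cover[c]) for c in combo):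
--                 irredundant_forms.append(combo)
--     return irredundant_forms
-- ===== Notes on version B (the rewrite author's own statement) =====
-- stated objective: alternative
-- what changed: B precomputes every cube's cover once in a table (the prime test then works by lookup instead of recomputing covers of generalized cubes) and replaces the leave-one-out redundancy loop by a single per-minterm counting pass: a combo is kept iff its union equals the minterms and every cube covers a minterm counted exactly once (a private minterm).
import Mathlib
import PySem

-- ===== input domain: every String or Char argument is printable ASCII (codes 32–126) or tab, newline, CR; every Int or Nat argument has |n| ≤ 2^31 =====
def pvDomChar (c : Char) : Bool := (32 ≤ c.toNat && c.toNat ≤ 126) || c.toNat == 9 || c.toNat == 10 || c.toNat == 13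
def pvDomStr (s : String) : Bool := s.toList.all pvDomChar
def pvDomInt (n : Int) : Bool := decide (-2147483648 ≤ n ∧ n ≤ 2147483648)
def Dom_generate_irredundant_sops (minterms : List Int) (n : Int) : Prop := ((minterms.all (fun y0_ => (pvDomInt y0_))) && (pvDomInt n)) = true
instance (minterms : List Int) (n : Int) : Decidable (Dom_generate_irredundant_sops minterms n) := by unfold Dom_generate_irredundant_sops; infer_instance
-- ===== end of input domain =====

-- B precomputes all cube covers once in a table and replaces the leave-one-out redundancy
-- scan by a single per-minterm counting pass (private-minterm test); objective: alternative.


-- ===== PORT A =====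
-- shared library helpers: itertools.product(vals, repeat=k) and itertools.combinations(xs, r)
-- (both Pythons call these itertools functions; exact for k = n ≥ 0, first slot varies slowest)
def pvProdRepeat (vals : List (Option Int)) : Nat → List (List (Option Int))
  | 0 => [[]]
  | k+1 => vals.flatMap (fun v => (pvProdRepeat vals k).map (fun t => v :: t))

def pvCombinations {α : Type} : List α → Nat → List (List α)
  | _, 0 => [[]]
  | [], _+1 => []
  | x :: xs, r+1 => (pvCombinations xs r).map (fun t => x :: t) ++ pvCombinations xs (r+1)

-- cube_to_minterms: `range(2**n)` is ported over Nat (its elements are ≥ 0; exact for n ≥ 0,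
-- Python raises for n < 0 — excluded by Pre_); `(m >> i) & 1` is Nat shift/and, cast on add.
def pvA_cube_to_minterms (cube : List (Option Int)) (n : Int) : List Int :=
  (List.range (2 ^ n.toNat)).foldl (fun mins (m : Nat) =>
    let bits := ((List.range n.toNat).reverse).map (fun i => ((m >>> i) &&& 1 : Nat))
    let ok := (cube.zip bits).all (fun p => p.1 == none || p.1 == some (p.2 : Int))
    if ok then PySem.Set.add mins (m : Int) else mins) []

def pvA_is_prime_implicant (cube : List (Option Int)) (minterms : List Int) (n : Int) : Bool :=
  let covered := pvA_cube_to_minterms cube n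
  if covered.isEmpty || !(PySem.Set.issubset covered minterms) then false
  else !((PySem.List.pyRange 0 n).any (fun i =>
    PySem.List.pyGetD cube i none != none &&
    PySem.Set.issubset (pvA_cube_to_minterms (PySem.List.pySetD cube i none) n) minterms))

def pvA_union_cover (cube_cover : PySem.Dict (List (Option Int)) (List Int))
    (combo : List (List (Option Int))) : PySem.Set Int :=
  combo.foldl (fun s c => PySem.Set.union s (cube_cover.getD c [])) PySem.Set.empty

def pvA_all_cubes (n : Int) : List (List (Option Int)) :=
  pvProdRepeat [some 0, some 1, none] n.toNat

def pvA_prime_cubes (minterms : List Int) (n : Int) : List (List (Option Int)) :=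
  (pvA_all_cubes n).filter (fun c => pvA_is_prime_implicant c minterms n)

def pvA_cube_cover (minterms : List Int) (n : Int) : PySem.Dict (List (Option Int)) (List Int) :=
  (pvA_prime_cubes minterms n).foldl (fun d c => d.insert c (pvA_cube_to_minterms c n)) PySem.Dict.empty

def generate_irredundant_sops (minterms : List Int) (n : Int) : List (List (List (Option Int))) :=
  let prime_cubes := pvA_prime_cubes minterms n
  let cube_cover := pvA_cube_cover minterms n
  (PySem.List.pyRange 1 ((prime_cubes.length : Int) + 1)).foldl (fun acc r =>
    (pvCombinations prime_cubes r.toNat).foldl (fun acc combo =>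
      if PySem.Set.equal (pvA_union_cover cube_cover combo) minterms then
        if !((List.range combo.length).any (fun i =>
              PySem.Set.equal (pvA_union_cover cube_cover (combo.eraseIdx i)) minterms))
        then acc ++ [combo] else acc
      else acc) acc) []

-- ===== PORT B =====
-- cover list of a cube: a filter of range(2**n) (same Nat porting of range(2**n) as in A)
def pvB_cover_of (cube : List (Option Int)) (n : Int) : List Int :=
  ((List.range (2 ^ n.toNat)).filter (fun m =>
    (cube.zip ((List.range n.toNat).reverse)).all
      (fun p => p.1 == none || p.1 == some (((m >>> p.2) &&& 1 : Nat) : Int)))).map (fun (m : Nat) => (m : Int))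

def pvB_all_cubes (n : Int) : List (List (Option Int)) :=
  pvProdRepeat [some 0, some 1, none] n.toNat

def pvB_cover (n : Int) : PySem.Dict (List (Option Int)) (List Int) :=
  (pvB_all_cubes n).foldl (fun d c => d.insert c (pvB_cover_of c n)) PySem.Dict.empty

def pvB_is_prime (minterms : List Int) (n : Int)
    (cover : PySem.Dict (List (Option Int)) (List Int)) (c : List (Option Int)) : Bool :=
  let mset := PySem.Set.ofList minterms
  let s := cover.getD c []
  !s.isEmpty && s.all (fun m => PySem.Set.contains mset m) &&
    ((PySem.List.pyRange 0 n).filter (fun i => PySem.List.pyGetD c i none != none)).all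
      (fun i => !((cover.getD (PySem.List.slice c none (some i) ++ [none] ++
                    PySem.List.slice c (some (i+1)) none) []).all
                  (fun m => PySem.Set.contains mset m)))

def pvB_prime_cubes (minterms : List Int) (n : Int)
    (cover : PySem.Dict (List (Option Int)) (List Int)) : List (List (Option Int)) :=
  (pvB_all_cubes n).foldl (fun acc c => if pvB_is_prime minterms n cover c then acc ++ [c] else acc) []

def pvB_combo_ok (minterms : List Int) (n : Int)
    (cover : PySem.Dict (List (Option Int)) (List Int)) (combo : List (List (Option Int))) : Bool :=
  let ms := combo.flatMap (fun c => cover.getD c [])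
  let counts := ms.foldl (fun d m => d.insert m (d.getD m 0 + 1)) (PySem.Dict.empty : PySem.Dict Int Int)
  PySem.Set.equal (PySem.Set.ofList ms) (PySem.Set.ofList minterms) &&
    combo.all (fun c => (cover.getD c []).any (fun m => counts.getD m 0 == 1))

def generate_irredundant_sops_alt (minterms : List Int) (n : Int) : List (List (List (Option Int))) :=
  let cover := pvB_cover n
  let prime_cubes := pvB_prime_cubes minterms n cover
  (PySem.List.pyRange 1 ((prime_cubes.length : Int) + 1)).foldl (fun acc r =>
    (pvCombinations prime_cubes r.toNat).foldl (fun acc combo =>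
      if pvB_combo_ok minterms n cover combo then acc ++ [combo] else acc) acc) []

-- ===== PRECONDITION & SPEC =====
-- Pre_: Python raises (ValueError in itertools.product / TypeError on range(2**n)) for n < 0.
def Pre_generate_irredundant_sops (minterms : List Int) (n : Int) : Prop := 0 ≤ n
instance (minterms : List Int) (n : Int) : Decidable (Pre_generate_irredundant_sops minterms n) := by unfold Pre_generate_irredundant_sops; infer_instance
def pvWitness_generate_irredundant_sops : List Int × Int := ([0, 1], 1)

def Spec_generate_irredundant_sops (minterms : List Int) (n : Int) (out : List (List (List (Option Int)))) : Prop := out = generate_irredundant_sops_alt minterms n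
instance (minterms : List Int) (n : Int) (out : List (List (List (Option Int)))) : Decidable (Spec_generate_irredundant_sops minterms n out) := by unfold Spec_generate_irredundant_sops; infer_instance

-- ===== CLAIM (what is proved, stated in full; the proofs are below) =====
def Claim_equal_generate_irredundant_sops : Prop := ∀ (minterms : List Int) (n : Int), Dom_generate_irredundant_sops minterms n → Pre_generate_irredundant_sops minterms n → Spec_generate_irredundant_sops minterms n (generate_irredundant_sops minterms n)


-- ===== LEMMAS AND PROOFS =====

-- ---- generic set / fold facts ----
theorem pv_issubset_iff {s t : List Int} :
    PySem.Set.issubset s t = true ↔ ∀ x ∈ s, x ∈ t := by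
  simp [PySem.Set.issubset, PySem.Set.contains, List.all_eq_true]

theorem pv_equal_iff {s t : List Int} :
    PySem.Set.equal s t = true ↔ (∀ x, x ∈ s ↔ x ∈ t) := by
  constructor
  · intro h x
    simp only [PySem.Set.equal, Bool.and_eq_true, pv_issubset_iff] at h
    exact ⟨fun hx => h.1 x hx, fun hx => h.2 x hx⟩
  · intro h
    simp only [PySem.Set.equal, Bool.and_eq_true, pv_issubset_iff]
    exact ⟨fun x hx => (h x).1 hx, fun x hx => (h x).2 hx⟩

theorem pv_mem_foldl_add {l s : List Int} {x : Int} :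
    x ∈ l.foldl PySem.Set.add s ↔ x ∈ s ∨ x ∈ l := by
  induction l generalizing s with
  | nil => simp
  | cons hd tl ih => simp [List.foldl_cons, ih, PySem.Set.mem_add]; tauto

theorem pv_mem_unionfold {β : Type} (g : β → List Int) (combo : List β) (s : List Int) (x : Int) :
    x ∈ combo.foldl (fun s c => PySem.Set.union s (g c)) s ↔ x ∈ s ∨ ∃ c ∈ combo, x ∈ g c := by
  induction combo generalizing s with
  | nil => simp
  | cons hd tl ih =>
    simp only [List.foldl_cons]
    rw [show (fun (s : List Int) c => PySem.Set.union s (g c)) = fun s c => PySem.Set.union s (g c) from rfl, ih]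
    simp only [PySem.Set.union, PySem.Set.update, pv_mem_foldl_add, List.mem_cons]
    constructor
    · rintro ((h | h) | ⟨c, hc, hx⟩)
      · exact Or.inl h
      · exact Or.inr ⟨hd, Or.inl rfl, h⟩
      · exact Or.inr ⟨c, Or.inr hc, hx⟩
    · rintro (h | ⟨c, hc, hx⟩)
      · exact Or.inl (Or.inl h)
      · rcases hc with rfl | hc
        · exact Or.inl (Or.inr hx)
        · exact Or.inr ⟨c, hc, hx⟩

-- fold-with-add over a nodup Nat list is filter-then-map
theorem pv_fold_add_filter (p : Nat → Bool) :
    ∀ (l : List Nat) (s : List Int), l.Nodup → (∀ x ∈ l, ((x : Int) ∉ s)) →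
    l.foldl (fun s m => if p m then PySem.Set.add s (m : Int) else s) s
      = s ++ (l.filter p).map (fun (m : Nat) => (m : Int)) := by
  intro l
  induction l with
  | nil => simp
  | cons hd tl ih =>
    intro s hnd hs
    simp only [List.foldl_cons]
    by_cases hp : p hd
    · have hhd : (hd : Int) ∉ s := hs hd (by simp)
      have hadd : PySem.Set.add s (hd : Int) = s ++ [(hd : Int)] := by
        simp only [PySem.Set.add, PySem.Set.contains]
        rw [if_neg]; simp [hhd]
      rw [hp, if_pos rfl, hadd, ih (s ++ [(hd : Int)]) hnd.of_cons]
      · simp [hp]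
      · intro x hx
        simp only [List.mem_append, List.mem_singleton]
        push Not
        refine ⟨hs x (by simp [hx]), ?_⟩
        have : x ≠ hd := by
          intro h; exact (List.nodup_cons.mp hnd).1 (h ▸ hx)
        exact_mod_cast this
    · rw [if_neg (by simp [hp]), ih s hnd.of_cons (fun x hx => hs x (by simp [hx]))]
      simp [hp]

-- dict built by inserting f(key) for every key of xs
theorem pv_getD_foldl_insert_not_mem {κ ν : Type} [BEq κ] [LawfulBEq κ] (f : κ → ν) :
    ∀ (xs : List κ) (d : PySem.Dict κ ν) (c : κ) (d0 : ν), c ∉ xs →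
    (xs.foldl (fun d c => d.insert c (f c)) d).getD c d0 = d.getD c d0 := by
  intro xs
  induction xs with
  | nil => simp
  | cons hd tl ih =>
    intro d c d0 hc
    simp only [List.foldl_cons]
    rw [ih _ c d0 (fun h => hc (by simp [h]))]
    exact PySem.Dict.getD_insert_of_ne d (f hd) d0 (fun h => hc (by simp [h]))

theorem pv_getD_foldl_insert {κ ν : Type} [BEq κ] [LawfulBEq κ] (f : κ → ν) :
    ∀ (xs : List κ) (d : PySem.Dict κ ν) (c : κ) (d0 : ν), c ∈ xs →
    (xs.foldl (fun d c => d.insert c (f c)) d).getD c d0 = f c := by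
  intro xs
  induction xs with
  | nil => simp
  | cons hd tl ih =>
    intro d c d0 hc
    simp only [List.foldl_cons]
    by_cases htl : c ∈ tl
    · exact ih _ c d0 htl
    · have hc' : c = hd := by
        rcases List.mem_cons.mp hc with h | h
        · exact h
        · exact absurd h htl
      rw [pv_getD_foldl_insert_not_mem f tl _ c d0 htl, hc']
      exact PySem.Dict.getD_insert_self d hd (f hd) d0

-- membership in itertools.product(vals, repeat=k)
theorem pv_mem_prodRepeat {vals : List (Option Int)} :
    ∀ {k : Nat} {c : List (Option Int)},
    c ∈ pvProdRepeat vals k ↔ c.length = k ∧ ∀ x ∈ c, x ∈ vals := by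
  intro k
  induction k with
  | zero => intro c; simp [pvProdRepeat]; rintro rfl; simp
  | succ k ih =>
    intro c
    simp only [pvProdRepeat, List.mem_flatMap, List.mem_map]
    constructor
    · rintro ⟨v, hv, t, ht, rfl⟩
      obtain ⟨hl, hall⟩ := ih.mp ht
      exact ⟨by simp [hl], by intro x hx; rcases List.mem_cons.mp hx with rfl | h; exact hv; exact hall x h⟩
    · rintro ⟨hl, hall⟩
      cases c with
      | nil => simp at hl
      | cons v t =>
        refine ⟨v, hall v (by simp), t, ih.mpr ⟨by simpa using hl, fun x hx => hall x (by simp [hx])⟩, rfl⟩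

-- elements of a combination are elements of the base list
theorem pv_mem_of_mem_pvCombinations {α : Type} :
    ∀ (xs : List α) (r : Nat) (combo : List α), combo ∈ pvCombinations xs r →
    ∀ c ∈ combo, c ∈ xs := by
  intro xs
  induction xs with
  | nil =>
    intro r combo h c hc
    cases r with
    | zero => simp [pvCombinations] at h; subst h; simp at hc
    | succ r => simp [pvCombinations] at h
  | cons x xs ih =>
    intro r combo h c hc
    cases r with
    | zero => simp [pvCombinations] at h; subst h; simp at hc
    | succ r =>
      simp only [pvCombinations, List.mem_append, List.mem_map] at h
      rcases h with ⟨t, ht, rfl⟩ | h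
      · rcases List.mem_cons.mp hc with rfl | h'
        · simp
        · exact List.mem_cons_of_mem x (ih r t ht c h')
      · exact List.mem_cons_of_mem x (ih (r+1) combo h c hc)


-- the two cover computations agree on every cube
theorem pv_cov_eq (cube : List (Option Int)) (n : Int) :
    pvA_cube_to_minterms cube n = pvB_cover_of cube n := by
  unfold pvA_cube_to_minterms pvB_cover_of
  have hpred : ∀ m : Nat,
      ((cube.zip (((List.range n.toNat).reverse).map (fun i => ((m >>> i) &&& 1 : Nat)))).all
        (fun p => p.1 == none || p.1 == some (p.2 : Int)))
      = ((cube.zip ((List.range n.toNat).reverse)).all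
        (fun p => p.1 == none || p.1 == some (((m >>> p.2) &&& 1 : Nat) : Int))) := by
    intro m
    rw [List.zip_map_right, List.all_map]
    rfl
  have hfun : (fun (mins : List Int) (m : Nat) =>
      let bits := ((List.range n.toNat).reverse).map (fun i => ((m >>> i) &&& 1 : Nat))
      let ok := (cube.zip bits).all (fun p => p.1 == none || p.1 == some (p.2 : Int))
      if ok then PySem.Set.add mins (m : Int) else mins)
      = fun (mins : List Int) (m : Nat) =>
        if ((cube.zip ((List.range n.toNat).reverse)).all
              (fun p => p.1 == none || p.1 == some (((m >>> p.2) &&& 1 : Nat) : Int)))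
        then PySem.Set.add mins (m : Int) else mins := by
    funext mins m
    show (if ((cube.zip (((List.range n.toNat).reverse).map (fun i => ((m >>> i) &&& 1 : Nat)))).all
        (fun p => p.1 == none || p.1 == some (p.2 : Int))) then PySem.Set.add mins (m : Int) else mins) = _
    rw [hpred m]
  rw [hfun]
  rw [pv_fold_add_filter _ (List.range (2 ^ n.toNat)) [] (List.nodup_range) (by simp)]
  simp


-- covers are duplicate-free
theorem pv_nodup_cov (cube : List (Option Int)) (n : Int) : (pvB_cover_of cube n).Nodup := by
  unfold pvB_cover_of
  apply List.Nodup.map _ (List.Nodup.filter _ List.nodup_range)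
  intro a b h
  simpa using h

-- multiplicity of a minterm in the concatenated covers = number of covering cubes
theorem pv_count_flatMap {β : Type} (g : β → List Int) (hnd : ∀ c, (g c).Nodup) (m : Int) :
    ∀ combo : List β, (combo.flatMap g).count m = combo.countP (fun c => decide (m ∈ g c)) := by
  intro combo
  induction combo with
  | nil => simp
  | cons hd tl ih =>
    rw [List.flatMap_cons, List.count_append, List.countP_cons, ih]
    by_cases hm : m ∈ g hd
    · rw [List.count_eq_one_of_mem (hnd hd) hm, if_pos (by simpa using hm)]; omega
    · rw [List.count_eq_zero.mpr hm, if_neg (by simpa using hm)]; omega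

theorem pv_countP_eraseIdx (p : List Int → Bool) :
    ∀ (l : List (List Int)) (i : Nat) (h : i < l.length),
    l.countP p = (l.eraseIdx i).countP p + (if p l[i] then 1 else 0) := by
  intro l
  induction l with
  | nil => intro i h; simp at h
  | cons hd tl ih =>
    intro i h
    cases i with
    | zero => simp [List.countP_cons]
    | succ i =>
      have hi : i < tl.length := by simpa using h
      rw [List.eraseIdx_cons_succ, List.countP_cons, List.countP_cons, ih i hi,
        List.getElem_cons_succ]
      exact Nat.add_right_comm _ _ _

-- the heart: leave-one-out coverage fails for every i  ⟺  every cube has a private minterm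
theorem pv_core (M : List Int) (covs : List (List Int))
    (hU : ∀ x, x ∈ covs.flatten ↔ x ∈ M) :
    (∃ i < covs.length, ∀ x, x ∈ (covs.eraseIdx i).flatten ↔ x ∈ M)
    ↔ ¬ (∀ cv ∈ covs, ∃ m ∈ cv, covs.countP (fun c => decide (m ∈ c)) = 1) := by
  constructor
  · rintro ⟨i, hi, hcov⟩ hall
    obtain ⟨m, hm, hcnt⟩ := hall covs[i] (List.getElem_mem hi)
    have hmM : m ∈ M := (hU m).mp (List.mem_flatten.mpr ⟨covs[i], List.getElem_mem hi, hm⟩)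
    have h1 : 0 < (covs.eraseIdx i).countP (fun c => decide (m ∈ c)) := by
      obtain ⟨cv, hcv, hmcv⟩ := List.mem_flatten.mp ((hcov m).mpr hmM)
      exact List.countP_pos_iff.mpr ⟨cv, hcv, by simpa using hmcv⟩
    have h2 := pv_countP_eraseIdx (fun c => decide (m ∈ c)) covs i hi
    rw [if_pos (by simpa using hm)] at h2
    omega
  · intro hnot
    have hex : ∃ cv ∈ covs, ∀ m ∈ cv, covs.countP (fun c => decide (m ∈ c)) ≠ 1 := by
      push Not at hnot
      exact hnot
    obtain ⟨cv, hcv, hpriv⟩ := hex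
    obtain ⟨i, hi, hieq⟩ := List.mem_iff_getElem.mp hcv
    refine ⟨i, hi, fun x => ⟨?_, ?_⟩⟩
    · intro hx
      obtain ⟨cv', hcv', hx'⟩ := List.mem_flatten.mp hx
      exact (hU x).mp (List.mem_flatten.mpr ⟨cv', (List.eraseIdx_sublist covs i).mem hcv', hx'⟩)
    · intro hxM
      have hx : 0 < covs.countP (fun c => decide (x ∈ c)) := by
        obtain ⟨cv', hcv', hx'⟩ := List.mem_flatten.mp ((hU x).mpr hxM)
        exact List.countP_pos_iff.mpr ⟨cv', hcv', by simpa using hx'⟩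
      have h2 := pv_countP_eraseIdx (fun c => decide (x ∈ c)) covs i hi
      by_cases hxi : x ∈ covs[i]
      · have hne : covs.countP (fun c => decide (x ∈ c)) ≠ 1 := hpriv x (by rw [← hieq]; exact hxi)
        rw [if_pos (by simpa using hxi)] at h2
        have hpos : 0 < (covs.eraseIdx i).countP (fun c => decide (x ∈ c)) := by omega
        obtain ⟨cv', hcv', hx'⟩ := List.countP_pos_iff.mp hpos
        exact List.mem_flatten.mpr ⟨cv', hcv', by simpa using hx'⟩
      · rw [if_neg (by simpa using hxi)] at h2
        have hpos : 0 < (covs.eraseIdx i).countP (fun c => decide (x ∈ c)) := by omega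
        obtain ⟨cv', hcv', hx'⟩ := List.countP_pos_iff.mp hpos
        exact List.mem_flatten.mpr ⟨cv', hcv', by simpa using hx'⟩


theorem pv_contains_iff {s : List Int} {x : Int} : PySem.Set.contains s x = true ↔ x ∈ s := by
  simp [PySem.Set.contains]

theorem pv_coverB_getD {n : Int} {c : List (Option Int)} (hc : c ∈ pvB_all_cubes n) :
    (pvB_cover n).getD c [] = pvB_cover_of c n := by
  unfold pvB_cover
  exact pv_getD_foldl_insert _ _ _ _ _ hc

theorem pv_coverA_getD {minterms : List Int} {n : Int} {c : List (Option Int)}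
    (hc : c ∈ pvA_prime_cubes minterms n) :
    (pvA_cube_cover minterms n).getD c [] = pvB_cover_of c n := by
  unfold pvA_cube_cover
  rw [pv_getD_foldl_insert _ _ _ _ _ hc]
  exact pv_cov_eq c n

-- canonical forms of the two prime tests
theorem pv_prime_canon_A (minterms : List Int) (n : Int) (c : List (Option Int)) :
    pvA_is_prime_implicant c minterms n = true ↔
    ((pvB_cover_of c n) ≠ [] ∧ (∀ x ∈ pvB_cover_of c n, x ∈ minterms) ∧
      ∀ i : Int, 0 ≤ i → i < n → PySem.List.pyGetD c i none ≠ none →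
        ¬ (∀ x ∈ pvB_cover_of (c.set i.toNat none) n, x ∈ minterms)) := by
  unfold pvA_is_prime_implicant
  simp only [pv_cov_eq]
  split
  · rename_i h
    constructor
    · intro hf; exact absurd hf (by simp)
    · rintro ⟨h1, h2, -⟩
      rcases Bool.or_eq_true_iff.mp h with h | h
      · exact absurd (List.isEmpty_iff.mp h) h1
      · rw [Bool.not_eq_true'] at h
        exact absurd (pv_issubset_iff.mpr h2) (by simp [h])
  · rename_i h
    rw [Bool.or_eq_true_iff] at h
    push Not at h
    obtain ⟨h1, h2⟩ := h
    have h1' : pvB_cover_of c n ≠ [] := by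
      intro hemp; exact h1 (by simp [hemp])
    have h2' : ∀ x ∈ pvB_cover_of c n, x ∈ minterms :=
      pv_issubset_iff.mp (by simpa using h2)
    simp only [Bool.not_eq_true', List.any_eq_false, PySem.List.mem_pyRange_one]
    constructor
    · intro hall
      refine ⟨h1', h2', ?_⟩
      intro i hi0 hin hne hsub
      have hfalse := hall i ⟨hi0, hin⟩
      have htrue : (PySem.List.pyGetD c i none != none &&
          PySem.Set.issubset (pvB_cover_of (PySem.List.pySetD c i none) n) minterms) = true := by
        rw [Bool.and_eq_true]
        refine ⟨by simp [hne], ?_⟩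
        rw [PySem.List.pySetD_of_nonneg c none hi0]
        exact pv_issubset_iff.mpr hsub
      exact hfalse htrue
    · rintro ⟨-, -, hloop⟩
      intro i hi habs
      rw [Bool.and_eq_true] at habs
      obtain ⟨hbne, hsubb⟩ := habs
      rw [PySem.List.pySetD_of_nonneg c none hi.1] at hsubb
      exact hloop i hi.1 hi.2 (by simpa using hbne) (pv_issubset_iff.mp hsubb)

theorem pv_prime_canon_B (minterms : List Int) (n : Int) (c : List (Option Int))
    (hn : 0 ≤ n) (hlen : c.length = n.toNat) (helems : ∀ x ∈ c, x ∈ [some 0, some 1, none]) :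
    pvB_is_prime minterms n (pvB_cover n) c = true ↔
    ((pvB_cover_of c n) ≠ [] ∧ (∀ x ∈ pvB_cover_of c n, x ∈ minterms) ∧
      ∀ i : Int, 0 ≤ i → i < n → PySem.List.pyGetD c i none ≠ none →
        ¬ (∀ x ∈ pvB_cover_of (c.set i.toNat none) n, x ∈ minterms)) := by
  have hcB : c ∈ pvB_all_cubes n := by
    unfold pvB_all_cubes
    exact pv_mem_prodRepeat.mpr ⟨hlen, helems⟩
  have hset : ∀ i : Int, 0 ≤ i → i < n →
      PySem.List.slice c none (some i) ++ [none] ++ PySem.List.slice c (some (i+1)) none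
        = c.set i.toNat none := by
    intro i h0 hi
    have hlt : i.toNat < c.length := by omega
    rw [PySem.List.slice_to c h0, PySem.List.slice_from c (by omega : (0:Int) ≤ i + 1),
      List.set_eq_take_cons_drop none hlt]
    have h1 : (i + 1).toNat = i.toNat + 1 := by omega
    rw [h1, List.append_assoc, List.singleton_append]
  have hsetmem : ∀ i : Int, 0 ≤ i → i < n → c.set i.toNat none ∈ pvB_all_cubes n := by
    intro i h0 hi
    unfold pvB_all_cubes
    refine pv_mem_prodRepeat.mpr ⟨by simp [hlen], ?_⟩
    intro x hx
    rcases List.mem_or_eq_of_mem_set hx with h | rfl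
    · exact helems x h
    · simp
  unfold pvB_is_prime
  simp only [pv_coverB_getD hcB, Bool.and_eq_true, Bool.not_eq_true', List.all_eq_true,
    List.mem_filter, PySem.List.mem_pyRange_one, pv_contains_iff, PySem.Set.mem_ofList]
  constructor
  · rintro ⟨⟨hne, hsub⟩, hloop⟩
    refine ⟨by simpa using hne, hsub, ?_⟩
    intro i h0 hi hgd hsub2
    have := hloop i ⟨⟨h0, hi⟩, by simpa using hgd⟩
    rw [hset i h0 hi, pv_coverB_getD (hsetmem i h0 hi), List.all_eq_false] at this
    obtain ⟨x, hx, hxc⟩ := this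
    simp only [pv_contains_iff, PySem.Set.mem_ofList] at hxc
    exact hxc (hsub2 x hx)
  · rintro ⟨hne, hsub, hloop⟩
    refine ⟨⟨by simpa using hne, hsub⟩, ?_⟩
    rintro i ⟨⟨h0, hi⟩, hgd⟩
    rw [hset i h0 hi, pv_coverB_getD (hsetmem i h0 hi), List.all_eq_false]
    have := hloop i h0 hi (by simpa using hgd)
    push Not at this
    obtain ⟨x, hx, hxm⟩ := this
    refine ⟨x, hx, ?_⟩
    intro hcon
    exact hxm ((PySem.Set.mem_ofList minterms x).mp (pv_contains_iff.mp hcon))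


theorem pv_primes_eq (minterms : List Int) (n : Int) (hn : 0 ≤ n) :
    pvA_prime_cubes minterms n = pvB_prime_cubes minterms n (pvB_cover n) := by
  unfold pvA_prime_cubes pvB_prime_cubes
  rw [PySem.List.foldl_append_if_eq_filter, List.nil_append]
  apply List.filter_congr
  intro c hc
  have hc' := hc
  unfold pvA_all_cubes at hc'
  obtain ⟨hlen, helems⟩ := pv_mem_prodRepeat.mp hc'
  exact Bool.eq_iff_iff.mpr
    ((pv_prime_canon_A minterms n c).trans (pv_prime_canon_B minterms n c hn hlen helems).symm)

theorem pv_mem_unionA {minterms : List Int} {n : Int} {combo : List (List (Option Int))}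
    (hg : ∀ c ∈ combo, (pvA_cube_cover minterms n).getD c [] = pvB_cover_of c n) (x : Int) :
    x ∈ pvA_union_cover (pvA_cube_cover minterms n) combo ↔
      ∃ c ∈ combo, x ∈ pvB_cover_of c n := by
  unfold pvA_union_cover
  rw [pv_mem_unionfold]
  constructor
  · rintro (h | ⟨c, hc, hx⟩)
    · simp [PySem.Set.empty] at h
    · exact ⟨c, hc, (hg c hc) ▸ hx⟩
  · rintro ⟨c, hc, hx⟩
    exact Or.inr ⟨c, hc, (hg c hc).symm ▸ hx⟩

theorem pv_if_nest {α : Type} (a b : Bool) (x y : α) :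
    (if a then (if b then x else y) else y) = if (a && b) then x else y := by
  cases a <;> cases b <;> simp

theorem pv_cond_eq (minterms : List Int) (n : Int)
    (combo : List (List (Option Int)))
    (hmem : ∀ c ∈ combo, c ∈ pvA_prime_cubes minterms n) :
    (PySem.Set.equal (pvA_union_cover (pvA_cube_cover minterms n) combo) minterms &&
      !((List.range combo.length).any (fun i =>
          PySem.Set.equal (pvA_union_cover (pvA_cube_cover minterms n) (combo.eraseIdx i)) minterms)))
    = pvB_combo_ok minterms n (pvB_cover n) combo := by
  have hgA : ∀ c ∈ combo, (pvA_cube_cover minterms n).getD c [] = pvB_cover_of c n :=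
    fun c h => pv_coverA_getD (hmem c h)
  have hprimesub : ∀ c ∈ pvA_prime_cubes minterms n, c ∈ pvB_all_cubes n := by
    intro c h
    unfold pvA_prime_cubes at h
    unfold pvB_all_cubes pvA_all_cubes at *
    exact (List.mem_filter.mp h).1
  have hgB : ∀ c ∈ combo, (pvB_cover n).getD c [] = pvB_cover_of c n :=
    fun c h => pv_coverB_getD (hprimesub c (hmem c h))
  unfold pvB_combo_ok
  have hms : combo.flatMap (fun c => (pvB_cover n).getD c []) =
      combo.flatMap (fun c => pvB_cover_of c n) := by
    rw [List.flatMap_def, List.flatMap_def, List.map_congr_left hgB]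
  rw [hms]
  -- both sides are conjunctions; compare them as propositions
  apply Bool.eq_iff_iff.mpr
  rw [Bool.and_eq_true, Bool.and_eq_true]
  have hUiff : PySem.Set.equal (pvA_union_cover (pvA_cube_cover minterms n) combo) minterms = true ↔
      (∀ x, x ∈ (combo.map (fun c => pvB_cover_of c n)).flatten ↔ x ∈ minterms) := by
    rw [pv_equal_iff]
    apply forall_congr'
    intro x
    rw [pv_mem_unionA hgA x, ← List.flatMap_def, List.mem_flatMap]
  have hU2iff : PySem.Set.equal (PySem.Set.ofList (combo.flatMap (fun c => pvB_cover_of c n)))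
      (PySem.Set.ofList minterms) = true ↔
      (∀ x, x ∈ (combo.map (fun c => pvB_cover_of c n)).flatten ↔ x ∈ minterms) := by
    rw [pv_equal_iff]
    apply forall_congr'
    intro x
    rw [PySem.Set.mem_ofList, PySem.Set.mem_ofList, ← List.flatMap_def]
  have hctr : (List.foldl (fun (d : PySem.Dict Int Int) m => d.insert m (d.getD m 0 + 1))
      PySem.Dict.empty (combo.flatMap (fun c => pvB_cover_of c n)))
      = PySem.Dict.counter (combo.flatMap (fun c => pvB_cover_of c n)) :=
    PySem.Dict.foldl_insert_getD_add_one_eq_counter _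
  constructor
  · rintro ⟨hU, hR⟩
    refine ⟨hU2iff.mpr (hUiff.mp hU), ?_⟩
    -- private-minterm test holds
    have hcore := pv_core minterms (combo.map (fun c => pvB_cover_of c n)) (hUiff.mp hU)
    rw [Bool.not_eq_true', List.any_eq_false] at hR
    have hnoex : ¬ ∃ i < (combo.map (fun c => pvB_cover_of c n)).length,
        ∀ x, x ∈ (((combo.map (fun c => pvB_cover_of c n)).eraseIdx i).flatten) ↔ x ∈ minterms := by
      rintro ⟨i, hi, hcov⟩
      rw [List.length_map] at hi
      have := hR i (List.mem_range.mpr hi)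
      rw [List.eraseIdx_map] at hcov
      have heq : PySem.Set.equal (pvA_union_cover (pvA_cube_cover minterms n) (combo.eraseIdx i)) minterms = true := by
        rw [pv_equal_iff]
        intro x
        rw [pv_mem_unionA (fun c h => hgA c ((List.eraseIdx_sublist combo i).subset h)) x]
        rw [← List.mem_flatMap, List.flatMap_def]
        exact hcov x
      exact this heq
    have hall := not_not.mp (fun hno => hnoex (hcore.mpr hno))
    rw [List.all_eq_true]
    intro c hc
    obtain ⟨m, hm, hcnt⟩ := hall (pvB_cover_of c n) (List.mem_map_of_mem hc)
    rw [List.any_eq_true]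
    refine ⟨m, by rw [hgB c hc]; exact hm, ?_⟩
    rw [hctr, PySem.Dict.getD_counter]
    have : (combo.flatMap (fun c => pvB_cover_of c n)).count m = 1 := by
      rw [pv_count_flatMap (fun c => pvB_cover_of c n) (fun c => pv_nodup_cov c n) m combo]
      rw [List.countP_map] at hcnt
      exact hcnt
    rw [this]
    simp
  · rintro ⟨hU, hP⟩
    have hUt := hU2iff.mp hU
    refine ⟨hUiff.mpr hUt, ?_⟩
    have hcore := pv_core minterms (combo.map (fun c => pvB_cover_of c n)) hUt
    have hall : ∀ cv ∈ combo.map (fun c => pvB_cover_of c n), ∃ m ∈ cv,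
        (combo.map (fun c => pvB_cover_of c n)).countP (fun c => decide (m ∈ c)) = 1 := by
      intro cv hcv
      obtain ⟨c, hc, rfl⟩ := List.mem_map.mp hcv
      rw [List.all_eq_true] at hP
      have := hP c hc
      rw [List.any_eq_true] at this
      obtain ⟨m, hm, hcnt⟩ := this
      rw [hgB c hc] at hm
      refine ⟨m, hm, ?_⟩
      rw [hctr, PySem.Dict.getD_counter] at hcnt
      have h1 : (combo.flatMap (fun c => pvB_cover_of c n)).count m = 1 := by
        have := of_decide_eq_true hcnt
        exact_mod_cast this
      rw [pv_count_flatMap (fun c => pvB_cover_of c n) (fun c => pv_nodup_cov c n) m combo] at h1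
      rw [List.countP_map]
      exact h1
    have hnoex := fun h => (hcore.mp h) hall
    rw [Bool.not_eq_true', List.any_eq_false]
    intro i hi
    rw [List.mem_range] at hi
    intro heq
    apply hnoex
    refine ⟨i, by rw [List.length_map]; exact hi, ?_⟩
    intro x
    rw [List.eraseIdx_map, ← List.flatMap_def, List.mem_flatMap]
    rw [pv_equal_iff] at heq
    have := heq x
    rw [pv_mem_unionA (fun c h => hgA c ((List.eraseIdx_sublist combo i).subset h)) x] at this
    exact this

-- ===== VERDICT (by name: the statement is the Claim_ definition above) =====
theorem generate_irredundant_sops_spec : Claim_equal_generate_irredundant_sops := by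
  intro minterms n hdom hpre
  unfold Spec_generate_irredundant_sops
  simp only [generate_irredundant_sops, generate_irredundant_sops_alt]
  rw [pv_primes_eq minterms n hpre]
  apply PySem.List.foldl_congr_mem
  intro acc r hr
  apply PySem.List.foldl_congr_mem
  intro acc2 combo hcombo
  have hmem : ∀ c ∈ combo, c ∈ pvA_prime_cubes minterms n := by
    rw [pv_primes_eq minterms n hpre]
    exact pv_mem_of_mem_pvCombinations _ _ _ hcombo
  rw [pv_if_nest, pv_cond_eq minterms n combo hmem]
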